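-- pv_equiv track=rewrite | github.com/gtavella/Esami | 07-06-22/es2.py | verifica_presenza
-- ===== SOURCE A (Python) =====
-- def verifica_presenza(a,b):
--     # inizializzo la lista v con la stessa lunghezza di a
--     # assunzione: il valore 0 e' un segnaposto (quindi valore temporaneo)
--     # assunzione: ogni segnaposto 0 verra' cambiato subito dopo l'inizializzazione della lista v
--     v = [0] * len(a)
--     for i in range(len(a)):
--         # elemento attuale di a
--         x = a[i]
--         # se l'elemento attuale di x c'e' almeno una volta in b:
--         if x in b:
--             v[i] = x
--         else:
--             # seleziona la sottolista con i incluso (quindi i+1)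
--             # poi fai la somma
--             v[i] = sum(a[:i+1])
--     return v
-- ===== SOURCE B (Python) =====
-- def verifica_presenza(a, b):
--     bs = set(b)
--     v = []
--     s = 0
--     for x in a:
--         s += x
--         v.append(x if x in bs else s)
--     return v
-- ===== Notes on version B (the rewrite author's own statement) =====
-- stated objective: faster
-- what changed: single pass keeping a running prefix sum and a precomputed set of b, instead of re-scanning b for membership and re-summing the prefix slice at every index
import Mathlib
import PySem

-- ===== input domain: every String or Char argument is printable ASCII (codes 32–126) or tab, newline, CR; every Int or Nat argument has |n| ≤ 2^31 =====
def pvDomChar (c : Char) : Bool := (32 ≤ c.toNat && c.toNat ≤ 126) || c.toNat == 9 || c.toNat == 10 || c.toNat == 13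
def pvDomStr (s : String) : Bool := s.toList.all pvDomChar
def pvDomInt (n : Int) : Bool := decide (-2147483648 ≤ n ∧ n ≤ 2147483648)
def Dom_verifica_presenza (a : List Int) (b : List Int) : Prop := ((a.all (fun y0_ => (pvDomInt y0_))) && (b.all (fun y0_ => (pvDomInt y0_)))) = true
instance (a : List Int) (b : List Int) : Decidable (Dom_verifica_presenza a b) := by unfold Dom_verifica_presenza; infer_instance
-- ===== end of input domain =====

-- B replaces A's per-index membership scan of b and prefix-slice re-summation by one pass
-- with a running sum and a set built once (objective: faster).

-- ===== PORT A =====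
-- v = [0]*len(a); for i in range(len(a)): x = a[i]; v[i] = x if x in b else sum(a[:i+1])
def verifica_presenza (a : List Int) (b : List Int) : List Int :=
  (PySem.List.pyRange 0 (PySem.List.len a) 1).foldl
    (fun v i =>
      let x := PySem.List.pyGetD a i 0        -- a[i]; i always in range here
      if b.contains x then
        PySem.List.pySetD v i x               -- v[i] = x; i always in range here
      else
        PySem.List.pySetD v i (PySem.List.slice a none (some (i + 1))).sum)
    (List.replicate a.length 0)

-- ===== PORT B =====
-- bs = set(b); s = 0; v = []; for x in a: s += x; v.append(x if x in bs else s)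
def verifica_presenza_alt (a : List Int) (b : List Int) : List Int :=
  let bs := PySem.Set.ofList b
  (a.foldl
    (fun (p : List Int × Int) x =>
      let s := p.2 + x
      (p.1 ++ [if bs.contains x then x else s], s))
    ([], 0)).1

-- ===== PRECONDITION & SPEC =====
def Spec_verifica_presenza (a : List Int) (b : List Int) (out : List Int) : Prop := out = verifica_presenza_alt a b
instance (a : List Int) (b : List Int) (out : List Int) : Decidable (Spec_verifica_presenza a b out) := by unfold Spec_verifica_presenza; infer_instance

-- ===== CLAIM (what is proved, stated in full; the proofs are below) =====
def Claim_equal_verifica_presenza : Prop := ∀ (a : List Int) (b : List Int), Dom_verifica_presenza a b → Spec_verifica_presenza a b (verifica_presenza a b)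

-- ===== LEMMAS AND PROOFS =====

-- the common value both programs compute at index i
def pvVal (a b : List Int) (i : Nat) : Int :=
  if b.contains (a.getD i 0) then a.getD i 0 else (a.take (i + 1)).sum

-- writing pvVal at positions 0..k-1 into a buffer of length n rewrites the first k cells
theorem writeAll_prefix (a b : List Int) (n k : Nat) (v0 : List Int)
    (hlen : v0.length = n) (hk : k ≤ n) :
    (List.range k).foldl (fun v i => v.set i (pvVal a b i)) v0
      = (List.range k).map (pvVal a b) ++ v0.drop k := by
  induction k with
  | zero => simp
  | succ k ih =>
    have hk' : k ≤ n := Nat.le_of_succ_le hk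
    rw [List.range_succ, List.foldl_append, ih hk']
    have hdrop : v0.drop k = v0[k] :: v0.drop (k + 1) := by
      rw [List.drop_eq_getElem_cons (by omega)]
    simp only [List.foldl_cons, List.foldl_nil]
    rw [List.set_append_right _ _ (by simp), List.map_append]
    have hidx : k - (List.map (pvVal a b) (List.range k)).length = 0 := by simp
    rw [hidx, hdrop, List.set_cons_zero, List.append_assoc]
    rfl

-- port A computes the map of pvVal
theorem portA_eq_map (a b : List Int) :
    verifica_presenza a b = (List.range a.length).map (pvVal a b) := by
  unfold verifica_presenza
  rw [PySem.List.len_eq, PySem.List.pyRange_one]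
  simp only [Int.sub_zero, Int.toNat_natCast]
  rw [List.foldl_map]
  rw [PySem.List.foldl_congr_mem _ _ (fun v k => v.set k (pvVal a b k)) _ ?_]
  · rw [writeAll_prefix a b a.length a.length _ (by simp) le_rfl]
    simp
  · intro v k _
    have h1 : ((0 : Int) + (k : Int)) = (k : Int) := by ring
    simp only [h1, PySem.List.pyGetD_natCast]
    have h2 : ((k : Int) + 1) = (((k + 1 : Nat)) : Int) := by push_cast; ring
    rw [h2, PySem.List.slice_to_natCast]
    unfold pvVal
    split_ifs with h <;> simp [PySem.List.pySetD_natCast]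

-- invariant for B's single pass, by induction on the remaining suffix
theorem portB_invariant (b : List Int) (rest : List Int) :
    ∀ pre : List Int,
    (rest.foldl
      (fun (p : List Int × Int) x =>
        let s := p.2 + x
        (p.1 ++ [if (PySem.Set.ofList b).contains x then x else s], s))
      ((List.range pre.length).map (pvVal (pre ++ rest) b), pre.sum)).1
      = (List.range (pre ++ rest).length).map (pvVal (pre ++ rest) b) := by
  induction rest with
  | nil => intro pre; simp
  | cons x rest' ih =>
    intro pre
    have hx : (PySem.Set.ofList b).contains x = b.contains x := by
      simp [PySem.Set.mem_ofList]
    have hval : (if (PySem.Set.ofList b).contains x then x else pre.sum + x)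
        = pvVal (pre ++ x :: rest') b pre.length := by
      unfold pvVal
      rw [hx]
      have hget : (pre ++ x :: rest').getD pre.length 0 = x := by
        simp [List.getD_eq_getElem?_getD]
      have htake : (pre ++ x :: rest').take (pre.length + 1) = pre ++ [x] := by
        simp [List.take_append]
      rw [hget, htake]
      split_ifs <;> simp
    have hstable : ∀ i ∈ List.range pre.length,
        pvVal (pre ++ x :: rest') b i = pvVal ((pre ++ [x]) ++ rest') b i := by
      intro i hi
      simp [List.append_assoc]
    have hmap : (List.range pre.length).map (pvVal (pre ++ x :: rest') b) ++
          [pvVal (pre ++ x :: rest') b pre.length]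
        = (List.range (pre ++ [x]).length).map (pvVal ((pre ++ [x]) ++ rest') b) := by
      rw [List.map_congr_left hstable]
      have : (pre ++ [x]).length = pre.length + 1 := by simp
      rw [this, List.range_succ, List.map_append]
      congr 1
      simp [List.append_assoc]
    simp only [List.foldl_cons]
    have hsum : pre.sum + x = (pre ++ [x]).sum := by simp
    calc (rest'.foldl
          (fun (p : List Int × Int) x =>
            let s := p.2 + x
            (p.1 ++ [if (PySem.Set.ofList b).contains x then x else s], s))
          ((List.range pre.length).map (pvVal (pre ++ x :: rest') b) ++
            [if (PySem.Set.ofList b).contains x then x else pre.sum + x], pre.sum + x)).1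
        = (rest'.foldl
            (fun (p : List Int × Int) x =>
              let s := p.2 + x
              (p.1 ++ [if (PySem.Set.ofList b).contains x then x else s], s))
            ((List.range (pre ++ [x]).length).map (pvVal ((pre ++ [x]) ++ rest') b),
              (pre ++ [x]).sum)).1 := by
          rw [hval, hmap, hsum]
      _ = (List.range ((pre ++ [x]) ++ rest').length).map (pvVal ((pre ++ [x]) ++ rest') b) :=
          ih (pre ++ [x])
      _ = (List.range (pre ++ x :: rest').length).map (pvVal (pre ++ x :: rest') b) := by
          simp [List.append_assoc]

theorem portB_eq_map (a b : List Int) :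
    verifica_presenza_alt a b = (List.range a.length).map (pvVal a b) := by
  unfold verifica_presenza_alt
  have := portB_invariant b a []
  simpa using this

-- ===== VERDICT (by name: the statement is the Claim_ definition above) =====
theorem verifica_presenza_spec : Claim_equal_verifica_presenza := by
  intro a b _
  unfold Spec_verifica_presenza
  rw [portA_eq_map, portB_eq_map]
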